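-- pv_equiv track=rewrite | github.com/NLPerWS/KMatrix | kninjllm/llm_chunk/document_splitter.py | split_and_merge_string
-- ===== SOURCE A (Python) =====
-- def split_and_merge_string(input_string, char_list, max_length):
--     """
--         Lengths are separated in the order of the character list based on the specified character list and length.
--         The length of each separated sentence cannot exceed the specified length, and the end of each sentence must end with the specified character list element.
--         If the separated sentences are too long, continue to separate them according to the specified character list until the separated sentences do not exceed the specified length.
--         And try to keep each separated sentence as long as possible: if there are consecutive sentences that do not add up to the maximum length, merge them into one sentence.
--     """
--     result = []
--     current_sentence = ''
--     for char in input_string: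
--         current_sentence += char
--         if char in char_list or len(current_sentence) >= max_length:
--             result.append(current_sentence)
--             current_sentence = ''
--     if current_sentence:
--         result.append(current_sentence)
--     merged_result = []
--     current_merged_sentence = ''
--     for sentence in result:
--         if len(current_merged_sentence) + len(sentence) <= max_length:
--             current_merged_sentence += sentence
--         else:
--             merged_result.append(current_merged_sentence)
--             current_merged_sentence = sentence
--     if current_merged_sentence:
--         merged_result.append(current_merged_sentence)
--     return merged_result
-- ===== SOURCE B (Python) =====
-- def split_and_merge_string(input_string, char_list, max_length):
--     n = len(input_string)
--     # pass 1: record segment end positions (indices), no strings built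
--     ends = []
--     seg_start = 0
--     for i, ch in enumerate(input_string):
--         if ch in char_list or i + 1 - seg_start >= max_length:
--             ends.append(i + 1)
--             seg_start = i + 1
--     if seg_start < n:
--         ends.append(n)
--     # pass 2: merge by extending an index window [m_start, m_end); flush via slicing
--     out = []
--     m_start = 0
--     m_end = 0
--     for e in ends:
--         if e - m_start <= max_length:
--             m_end = e
--         else:
--             out.append(input_string[m_start:m_end])
--             m_start, m_end = m_end, e
--     if m_end > m_start:
--         out.append(input_string[m_start:m_end])
--     return out
-- ===== Notes on version B (the rewrite author's own statement) =====
-- stated objective: alternative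
-- what changed: B never concatenates strings: pass 1 records only the integer cut positions of the segments, and pass 2 merges by widening an index window [m_start, m_end) and emitting slices of the original string when the window would exceed max_length.
import Mathlib
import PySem

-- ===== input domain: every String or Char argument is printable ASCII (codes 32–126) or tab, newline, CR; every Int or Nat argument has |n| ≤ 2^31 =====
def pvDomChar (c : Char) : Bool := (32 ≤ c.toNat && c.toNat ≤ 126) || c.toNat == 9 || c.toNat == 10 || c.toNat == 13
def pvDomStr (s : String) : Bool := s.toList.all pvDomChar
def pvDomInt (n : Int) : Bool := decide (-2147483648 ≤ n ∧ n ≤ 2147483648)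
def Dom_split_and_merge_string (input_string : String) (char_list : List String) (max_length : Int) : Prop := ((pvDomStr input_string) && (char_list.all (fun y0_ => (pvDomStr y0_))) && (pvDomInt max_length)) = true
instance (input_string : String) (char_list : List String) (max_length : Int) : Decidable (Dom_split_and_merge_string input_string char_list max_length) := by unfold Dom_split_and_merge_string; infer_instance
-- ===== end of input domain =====

-- B builds no strings during the scans: pass 1 records integer cut positions only, pass 2 merges
-- by widening an index window and emits slices of the original string (objective: alternative, not faster).
-- ===== PORT A =====
def pvSplitStep (char_list : List String) (max_length : Int) (st : List (List Char) × List Char) (c : Char) : List (List Char) × List Char :=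
  let cs := st.2 ++ [c]
  if String.singleton c ∈ char_list ∨ max_length ≤ (cs.length : Int) then (st.1 ++ [cs], [])
  else (st.1, cs)

def pvMergeStep (max_length : Int) (st : List (List Char) × List Char) (s : List Char) : List (List Char) × List Char :=
  if ((st.2.length : Int) + (s.length : Int)) ≤ max_length then (st.1, st.2 ++ s)
  else (st.1 ++ [st.2], s)

def split_and_merge_string (input_string : String) (char_list : List String) (max_length : Int) : List String :=
  -- pass 1: split into segments
  let p := input_string.toList.foldl (pvSplitStep char_list max_length) ([], [])
  let result := if p.2 ≠ [] then p.1 ++ [p.2] else p.1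
  -- pass 2: merge adjacent segments
  let q := result.foldl (pvMergeStep max_length) ([], [])
  let merged := if q.2 ≠ [] then q.1 ++ [q.2] else q.1
  merged.map String.mk

-- ===== PORT B =====
-- pass 1 of Source B: enumerate the chars, returning (list of cut end positions, final seg_start)
def pvCutEnds (char_list : List String) (max_length : Int) : List Char → Nat → Nat → List Nat × Nat
  | [], _, segStart => ([], segStart)
  | c :: rest, i, segStart =>
    if String.singleton c ∈ char_list ∨ ((i : Int) + 1 - (segStart : Int)) ≥ max_length then
      let r := pvCutEnds char_list max_length rest (i + 1) (i + 1)
      ((i + 1) :: r.1, r.2)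
    else pvCutEnds char_list max_length rest (i + 1) segStart

-- Python s[a:b]; exact for 0 ≤ a ≤ b ≤ len s, the only way Source B slices
def pvSlice (s : List Char) (a b : Nat) : List Char := (s.drop a).take (b - a)

-- pass 2 of Source B: merge window [mStart, mEnd) over the end positions
def pvMergeEnds (s : List Char) (max_length : Int) : List Nat → Nat → Nat → List String
  | [], mStart, mEnd => if mStart < mEnd then [String.mk (pvSlice s mStart mEnd)] else []
  | e :: rest, mStart, mEnd =>
    if (e : Int) - (mStart : Int) ≤ max_length then pvMergeEnds s max_length rest mStart e
    else String.mk (pvSlice s mStart mEnd) :: pvMergeEnds s max_length rest mEnd e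

def split_and_merge_string_alt (input_string : String) (char_list : List String) (max_length : Int) : List String :=
  let s := input_string.toList
  let r := pvCutEnds char_list max_length s 0 0
  let ends := if r.2 < s.length then r.1 ++ [s.length] else r.1
  pvMergeEnds s max_length ends 0 0

-- ===== PRECONDITION & SPEC =====
def Spec_split_and_merge_string (input_string : String) (char_list : List String) (max_length : Int) (out : List String) : Prop := out = split_and_merge_string_alt input_string char_list max_length
instance (input_string : String) (char_list : List String) (max_length : Int) (out : List String) : Decidable (Spec_split_and_merge_string input_string char_list max_length out) := by unfold Spec_split_and_merge_string; infer_instance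

-- ===== CLAIM (what is proved, stated in full; the proofs are below) =====
def Claim_equal_split_and_merge_string : Prop := ∀ (input_string : String) (char_list : List String) (max_length : Int), Dom_split_and_merge_string input_string char_list max_length → Spec_split_and_merge_string input_string char_list max_length (split_and_merge_string input_string char_list max_length)

-- ===== LEMMAS AND PROOFS =====
-- pure segment recursion used only by the proofs (mirrors A's first loop)
def pvSegs (char_list : List String) (max_length : Int) : List Char → List Char → List (List Char) × List Char
  | [], cs => ([], cs)
  | c :: rest, cs =>
    let cs' := cs ++ [c]
    if String.singleton c ∈ char_list ∨ max_length ≤ (cs'.length : Int) then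
      let p := pvSegs char_list max_length rest []
      (cs' :: p.1, p.2)
    else pvSegs char_list max_length rest cs'

-- segments determined by a start position and a list of end positions
def pvSegsOf (s : List Char) : Nat → List Nat → List (List Char)
  | _, [] => []
  | a, e :: rest => pvSlice s a e :: pvSegsOf s e rest

-- ascending-position predicate for the cut lists
def pvAsc : Nat → List Nat → Prop
  | _, [] => True
  | a, e :: rest => a ≤ e ∧ pvAsc e rest

theorem pvAsc_le (a b : Nat) (l : List Nat) (h : a ≤ b) (hl : pvAsc b l) : pvAsc a l := by
  cases l with
  | nil => trivial
  | cons e t => exact ⟨le_trans h hl.1, hl.2⟩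

theorem pvAsc_append_last :
    ∀ (l : List Nat) (a n : Nat), pvAsc a l → (∀ e ∈ l, e ≤ n) → a ≤ n →
    pvAsc a (l ++ [n]) := by
  intro l
  induction l with
  | nil => intro a n _ _ h; exact ⟨h, trivial⟩
  | cons e t ih =>
    intro a n hch hb ha
    exact ⟨hch.1, ih e n hch.2 (fun x hx => hb x (List.mem_cons_of_mem _ hx))
      (hb e (List.mem_cons_self ..))⟩

theorem pvGetLastD_cons (x d : Nat) (l : List Nat) :
    (x :: l).getLast?.getD d = l.getLast?.getD x := by
  cases l with
  | nil => rfl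
  | cons y ys =>
    rw [List.getLast?_cons_cons]
    cases hz : (y :: ys).getLast? with
    | none => simp [List.getLast?_eq_none_iff] at hz
    | some z => rfl

theorem pvSplit_eq_segs (char_list : List String) (max_length : Int) :
    ∀ (l : List Char) (acc : List (List Char)) (cs : List Char),
    l.foldl (pvSplitStep char_list max_length) (acc, cs)
      = (acc ++ (pvSegs char_list max_length l cs).1, (pvSegs char_list max_length l cs).2) := by
  intro l
  induction l with
  | nil => intro acc cs; simp [pvSegs]
  | cons c rest ih =>
    intro acc cs
    simp only [List.foldl_cons, pvSegs, pvSplitStep]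
    split
    · simp [ih]
    · simp [ih]

theorem pvSlice_len (s : List Char) (a b : Nat) (h1 : a ≤ b) (h2 : b ≤ s.length) :
    (pvSlice s a b).length = b - a := by
  simp [pvSlice]; omega

theorem pvSlice_append (s : List Char) (a b c : Nat) (h1 : a ≤ b) (h2 : b ≤ c) :
    pvSlice s a b ++ pvSlice s b c = pvSlice s a c := by
  unfold pvSlice
  have h3 : c - a = (b - a) + (c - b) := by omega
  have h4 : (s.drop a).drop (b - a) = s.drop b := by
    rw [List.drop_drop]; congr 1; omega
  rw [h3, List.take_add, h4]

theorem pvSlice_single (s : List Char) (i : Nat) (c : Char) (rest : List Char)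
    (h : s.drop i = c :: rest) : pvSlice s i (i + 1) = [c] := by
  unfold pvSlice
  have : i + 1 - i = 1 := by omega
  rw [this, h]
  rfl

-- structural facts about the cut positions
theorem pvCutEnds_facts (char_list : List String) (max_length : Int) :
    ∀ (l : List Char) (i segStart : Nat), segStart ≤ i →
    pvAsc i (pvCutEnds char_list max_length l i segStart).1 ∧
    (∀ e ∈ (pvCutEnds char_list max_length l i segStart).1, e ≤ i + l.length) ∧
    (pvCutEnds char_list max_length l i segStart).2
      = (pvCutEnds char_list max_length l i segStart).1.getLast?.getD segStart ∧
    segStart ≤ (pvCutEnds char_list max_length l i segStart).2 ∧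
    (pvCutEnds char_list max_length l i segStart).2 ≤ i + l.length := by
  intro l
  induction l with
  | nil =>
    intro i segStart h
    refine ⟨trivial, by simp [pvCutEnds], rfl, le_refl _, by simp [pvCutEnds]; omega⟩
  | cons c rest ih =>
    intro i segStart h
    simp only [pvCutEnds]
    split
    · obtain ⟨hc, hb, hl, hs, hu⟩ := ih (i + 1) (i + 1) (le_refl _)
      refine ⟨⟨by omega, hc⟩, ?_, ?_, by omega, by simp only [List.length_cons] at hu ⊢; omega⟩
      · intro e he
        rcases List.mem_cons.mp he with h' | h'
        · subst h'; simp
        · have := hb e h'; simp at this ⊢; omega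
      · rw [pvGetLastD_cons]; exact hl
    · obtain ⟨hc, hb, hl, hs, hu⟩ := ih (i + 1) segStart (by omega)
      refine ⟨pvAsc_le i (i + 1) _ (by omega) hc, ?_, hl, hs, by simp only [List.length_cons] at hu ⊢; omega⟩
      · intro e he; have := hb e he; simp at this ⊢; omega

-- pass-1 correspondence: A's segments are the slices between B's cut positions
theorem pvSegs_corr (char_list : List String) (max_length : Int) (s : List Char) :
    ∀ (l : List Char) (i segStart : Nat), segStart ≤ i → s.drop i = l →
    pvSegs char_list max_length l (pvSlice s segStart i)
      = (pvSegsOf s segStart (pvCutEnds char_list max_length l i segStart).1,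
         pvSlice s (pvCutEnds char_list max_length l i segStart).2 s.length) := by
  intro l
  induction l with
  | nil =>
    intro i segStart h hd
    have hlen : s.length ≤ i := List.drop_eq_nil_iff.mp hd
    have h1 : (s.drop segStart).length ≤ i - segStart := by simp; omega
    have h2 : (s.drop segStart).length ≤ s.length - segStart := by simp
    simp [pvSegs, pvCutEnds, pvSegsOf, pvSlice, List.take_of_length_le h1,
      List.take_of_length_le h2]
  | cons c rest ih =>
    intro i segStart h hd
    have hi : i < s.length := by
      by_contra hcon
      have hnil : s.drop i = [] := List.drop_eq_nil_iff.mpr (by omega)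
      rw [hnil] at hd
      exact (List.cons_ne_nil c rest) hd.symm
    have hrest : s.drop (i + 1) = rest := by
      have : s.drop (i + 1) = (s.drop i).tail := by rw [List.tail_drop]
      rw [this, hd]; rfl
    have hlen : (pvSlice s segStart i).length = i - segStart :=
      pvSlice_len s segStart i h (by omega)
    have hslice1 : pvSlice s segStart i ++ [c] = pvSlice s segStart (i + 1) := by
      rw [← pvSlice_single s i c rest hd]
      exact pvSlice_append s segStart i (i + 1) h (by omega)
    have hcond : (max_length ≤ ((pvSlice s segStart i ++ [c]).length : Int))
        ↔ ((i : Int) + 1 - (segStart : Int) ≥ max_length) := by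
      simp [hlen]
      constructor <;> intro hc <;> omega
    simp only [pvSegs, pvCutEnds]
    by_cases hcut : String.singleton c ∈ char_list ∨ ((i : Int) + 1 - (segStart : Int)) ≥ max_length
    · have hcut' : String.singleton c ∈ char_list ∨ max_length ≤ ((pvSlice s segStart i ++ [c]).length : Int) := by
        rcases hcut with h' | h'
        · exact Or.inl h'
        · exact Or.inr (hcond.mpr h')
      rw [if_pos hcut', if_pos hcut]
      have hnil : (pvSlice s (i + 1) (i + 1)) = [] := by simp [pvSlice]
      have ihe := ih (i + 1) (i + 1) (le_refl _) hrest
      rw [hnil] at ihe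
      rw [ihe]
      simp only [pvSegsOf]
      rw [hslice1]
    · have hcut' : ¬ (String.singleton c ∈ char_list ∨ max_length ≤ ((pvSlice s segStart i ++ [c]).length : Int)) := by
        intro h'
        rcases h' with h' | h'
        · exact hcut (Or.inl h')
        · exact hcut (Or.inr (hcond.mp h'))
      rw [if_neg hcut', if_neg hcut]
      rw [hslice1]
      exact ih (i + 1) segStart (by omega) hrest

-- out-accumulator factorisation of A's merge fold
theorem pvMerge_acc (max_length : Int) :
    ∀ (l : List (List Char)) (a : List (List Char)) (c : List Char),
    l.foldl (pvMergeStep max_length) (a, c)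
      = (a ++ (l.foldl (pvMergeStep max_length) ([], c)).1,
         (l.foldl (pvMergeStep max_length) ([], c)).2) := by
  intro l
  induction l with
  | nil => intro a c; simp
  | cons x t ih =>
    intro a c
    simp only [List.foldl_cons, pvMergeStep]
    split
    · exact ih a (c ++ x)
    · rw [ih (a ++ [c]) x, ih ([] ++ [c]) x]
      simp

-- pass-2 correspondence
theorem pvMerge_corr (max_length : Int) (s : List Char) :
    ∀ (ends : List Nat) (mStart mEnd : Nat), mStart ≤ mEnd → mEnd ≤ s.length →
    pvAsc mEnd ends → (∀ e ∈ ends, e ≤ s.length) →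
    pvMergeEnds s max_length ends mStart mEnd
      = (let q := (pvSegsOf s mEnd ends).foldl (pvMergeStep max_length) ([], pvSlice s mStart mEnd)
         (if q.2 ≠ [] then q.1 ++ [q.2] else q.1).map String.mk) := by
  intro ends
  induction ends with
  | nil =>
    intro mStart mEnd h1 h2 _ _
    simp only [pvMergeEnds, pvSegsOf, List.foldl_nil]
    by_cases h : mStart < mEnd
    · have : pvSlice s mStart mEnd ≠ [] := by
        intro hn
        have := pvSlice_len s mStart mEnd h1 h2
        rw [hn] at this; simp at this; omega
      simp [h, this]
    · have he : pvSlice s mStart mEnd = [] := by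
        have : mStart = mEnd := by omega
        simp [this, pvSlice]
      simp [h, he]
  | cons e rest ih =>
    intro mStart mEnd h1 h2 hch hb
    have hme : mEnd ≤ e := hch.1
    have hch' : pvAsc e rest := hch.2
    have hes : e ≤ s.length := hb e (List.mem_cons_self ..)
    have hb' : ∀ x ∈ rest, x ≤ s.length := fun x hx => hb x (List.mem_cons_of_mem _ hx)
    have l1 : (pvSlice s mStart mEnd).length = mEnd - mStart := pvSlice_len s mStart mEnd h1 h2
    have l2 : (pvSlice s mEnd e).length = e - mEnd := pvSlice_len s mEnd e hme hes
    have hcond : (((pvSlice s mStart mEnd).length : Int) + ((pvSlice s mEnd e).length : Int) ≤ max_length)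
        ↔ ((e : Int) - (mStart : Int) ≤ max_length) := by
      rw [l1, l2]; constructor <;> intro hc <;> omega
    simp only [pvMergeEnds, pvSegsOf, List.foldl_cons, pvMergeStep]
    by_cases hc : (e : Int) - (mStart : Int) ≤ max_length
    · rw [if_pos hc, if_pos (hcond.mpr hc)]
      rw [pvSlice_append s mStart mEnd e h1 hme]
      exact ih mStart e (le_trans h1 hme) hes hch' hb'
    · rw [if_neg hc, if_neg (fun h' => hc (hcond.mp h'))]
      rw [pvMerge_acc max_length (pvSegsOf s e rest) ([] ++ [pvSlice s mStart mEnd]) (pvSlice s mEnd e)]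
      have := ih mEnd e hme hes hch' hb'
      simp only at this
      rw [this]
      by_cases hq : ((pvSegsOf s e rest).foldl (pvMergeStep max_length) ([], pvSlice s mEnd e)).2 = []
      · simp [hq]
      · simp [hq]

-- appending the trailing end position n to the segments list
theorem pvSegsOf_append (s : List Char) :
    ∀ (l : List Nat) (a n : Nat),
    pvSegsOf s a (l ++ [n]) = pvSegsOf s a l ++ [pvSlice s (l.getLast?.getD a) n] := by
  intro l
  induction l with
  | nil => intro a n; simp [pvSegsOf]
  | cons e t ih =>
    intro a n
    have hgl : ((e :: t)).getLast?.getD a = t.getLast?.getD e := pvGetLastD_cons e a t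
    simp [pvSegsOf, ih, hgl]

-- ===== VERDICT (by name: the statement is the Claim_ definition above) =====
theorem split_and_merge_string_spec : Claim_equal_split_and_merge_string := by
  intro input_string char_list max_length _
  unfold Spec_split_and_merge_string split_and_merge_string split_and_merge_string_alt
  simp only []
  set s := input_string.toList with hs
  have h00 : pvSlice s 0 0 = [] := by simp [pvSlice]
  have hseg := pvSegs_corr char_list max_length s s 0 0 (le_refl 0) (by simp)
  rw [h00] at hseg
  have hfacts := pvCutEnds_facts char_list max_length s 0 0 (le_refl 0)
  obtain ⟨hch, hb, hlast, _, hub⟩ := hfacts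
  have hb' : ∀ e ∈ (pvCutEnds char_list max_length s 0 0).1, e ≤ s.length := by
    intro e he; have := hb e he; omega
  have hub' : (pvCutEnds char_list max_length s 0 0).2 ≤ s.length := by omega
  rw [show (([], []) : List (List Char) × List Char) = (([] : List (List Char)), ([] : List Char)) from rfl,
    pvSplit_eq_segs, hseg]
  simp only [List.nil_append]
  by_cases hrem : (pvCutEnds char_list max_length s 0 0).2 < s.length
  · have hne : pvSlice s (pvCutEnds char_list max_length s 0 0).2 s.length ≠ [] := by
      intro hn
      have := pvSlice_len s (pvCutEnds char_list max_length s 0 0).2 s.length (by omega) (le_refl _)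
      rw [hn] at this; simp at this; omega
    rw [if_pos hrem, if_pos hne]
    rw [pvMerge_corr max_length s _ 0 0 (le_refl 0) (by omega)
      (pvAsc_append_last _ 0 s.length hch hb' (by omega))
      (by intro e he; rcases List.mem_append.mp he with h' | h'
          · exact hb' e h'
          · simp at h'; omega)]
    rw [h00, pvSegsOf_append, ← hlast]
  · have he2 : (pvCutEnds char_list max_length s 0 0).2 = s.length := by omega
    have hnil : pvSlice s (pvCutEnds char_list max_length s 0 0).2 s.length = [] := by
      simp [pvSlice, he2]
    rw [if_neg hrem]
    rw [pvMerge_corr max_length s _ 0 0 (le_refl 0) (by omega) hch hb']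
    rw [h00]
    rw [if_neg (show ¬ pvSlice s (pvCutEnds char_list max_length s 0 0).2 s.length ≠ [] by
      simp [hnil])]
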